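-- pv_equiv track=rewrite | github.com/GovAlta/adsp-monorepo | tools/python/xdp-converter/src/xdp_parser/help_text_extractor.py | iter_js_string_literals
-- ===== SOURCE A (Python) =====
-- def iter_js_string_literals(js: str):
--     """
--     Yield raw (still-escaped) contents of JS single- or double-quoted string literals.
--
--     Notes:
--       - Permissive: doesn't try to skip comments or template strings.
--       - Safe: linear scan, respects backslash escapes.
--     """
--     i, n = 0, len(js)
--     while i < n:
--         q = js[i]
--         if q not in ("'", '"'):
--             i += 1
--             continue
--
--         i += 1  # move past opening quote
--         start = i
--         chunks: list[str] = []
--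
--         while i < n:
--             c = js[i]
--             if c == "\\":  # escape sequence
--                 if i + 1 < n:
--                     # flush preceding chunk, keep escape pair as-is
--                     if start < i:
--                         chunks.append(js[start:i])
--                     chunks.append(js[i : i + 2])
--                     i += 2
--                     start = i
--                     continue
--                 # dangling backslash; stop this literal
--                 i += 1
--                 break
--
--             if c == q:  # closing quote
--                 if start < i:
--                     chunks.append(js[start:i])
--                 yield "".join(chunks)
--                 i += 1
--                 break
--
--             i += 1
--         else:
--             # Unterminated string literal; stop scanning
--             return
-- ===== SOURCE B (Python) =====
-- def iter_js_string_literals(js: str):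
--     """Yield raw (still-escaped) contents of JS string literals.
--
--     Single flat state-machine loop: `quote` (None when outside a literal),
--     `content_start`, and an `escaped` flag; each literal is sliced out once
--     at its closing quote.
--     """
--     quote = None
--     escaped = False
--     content_start = 0
--     for i, c in enumerate(js):
--         if quote is None:
--             if c == "'" or c == '"':
--                 quote = c
--                 content_start = i + 1
--         elif escaped:
--             escaped = False
--         elif c == "\\":
--             escaped = True
--         elif c == quote:
--             yield js[content_start:i]
--             quote = None
-- ===== Notes on version B (the rewrite author's own statement) =====
-- stated objective: simpler
-- what changed: Replaced A's nested while-loops with chunk-list accumulation and re-synced start indices by one flat state-machine loop (quote/escaped/content_start) that slices each literal out once at its closing quote.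
import Mathlib
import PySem

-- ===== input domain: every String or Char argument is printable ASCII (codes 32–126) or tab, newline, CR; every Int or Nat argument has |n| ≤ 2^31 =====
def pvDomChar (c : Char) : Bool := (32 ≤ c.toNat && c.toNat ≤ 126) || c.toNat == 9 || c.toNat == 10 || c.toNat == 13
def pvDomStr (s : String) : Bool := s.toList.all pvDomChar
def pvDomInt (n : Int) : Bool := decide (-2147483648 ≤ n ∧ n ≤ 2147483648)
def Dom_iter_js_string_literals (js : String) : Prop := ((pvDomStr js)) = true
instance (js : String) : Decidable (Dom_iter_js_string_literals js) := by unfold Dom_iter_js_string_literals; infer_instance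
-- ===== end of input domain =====

-- B replaces A's nested while-loops with chunk-list accumulation by one flat state-machine
-- loop (quote / escaped / content_start) that slices each literal once; objective: simpler.

-- ===== PORT A =====
-- js[a:b] for 0 ≤ a ≤ b, over List Char (exact for in-range non-negative slice bounds, the only ones used)
def pvSl (js : List Char) (a b : Nat) : List Char := (js.drop a).take (b - a)

-- inner `while i < n` loop of A: returns some (some s, j) when a literal closes (yield s, resume at j),
-- some (none, j) on a dangling backslash (break without yield; j = n there), and none for an
-- unterminated literal (the while-else `return`).  `fuel` is a pure totality guard (the index i
-- strictly increases towards js.length; callers pass fuel ≥ js.length - i, so fuel never runs out).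
def pvInnerA (js : List Char) (q : Char) : Nat → Nat → Nat → List (List Char) → Option (Option (List Char) × Nat)
  | 0, _, _, _ => none
  | fuel+1, i, start, chunks =>
    if h : i < js.length then
      if js[i] = '\\' then
        if i + 1 < js.length then
          pvInnerA js q fuel (i+2) (i+2)
            ((if start < i then chunks ++ [pvSl js start i] else chunks) ++ [pvSl js i (i+2)])
        else some (none, i+1)
      else if js[i] = q then
        some (some ((if start < i then chunks ++ [pvSl js start i] else chunks).flatten), i+1)
      else pvInnerA js q fuel (i+1) start chunks
    else none

-- outer `while i < n` loop of A (same fuel guard)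
def pvOuterA (js : List Char) : Nat → Nat → List (List Char)
  | 0, _ => []
  | fuel+1, i =>
    if h : i < js.length then
      if js[i] = '\'' ∨ js[i] = '"' then
        match pvInnerA js (js[i]) fuel (i+1) (i+1) [] with
        | some (some s, j) => s :: pvOuterA js fuel j
        | some (none, j) => pvOuterA js fuel j
        | none => []
      else pvOuterA js fuel (i+1)
    else []

def iter_js_string_literals (js : String) : List String :=
  (pvOuterA js.toList js.toList.length 0).map (fun l => String.ofList l)

-- ===== PORT B =====
-- the single `for i, c in enumerate(js)` loop of B; state: quote, escaped, content_start.
-- fuel is the same pure totality guard (one unit per character).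
def pvLoopB (js : List Char) : Nat → Option Char → Bool → Nat → Nat → List (List Char) → List (List Char)
  | 0, _, _, _, _, acc => acc
  | fuel+1, quote, escaped, cs, i, acc =>
    if h : i < js.length then
      match quote with
      | none =>
        if js[i] = '\'' ∨ js[i] = '"' then pvLoopB js fuel (some (js[i])) false (i+1) (i+1) acc
        else pvLoopB js fuel none false cs (i+1) acc
      | some q =>
        if escaped then pvLoopB js fuel (some q) false cs (i+1) acc
        else if js[i] = '\\' then pvLoopB js fuel (some q) true cs (i+1) acc
        else if js[i] = q then pvLoopB js fuel none false cs (i+1) (acc ++ [pvSl js cs i])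
        else pvLoopB js fuel (some q) false cs (i+1) acc
    else acc

def iter_js_string_literals_alt (js : String) : List String :=
  (pvLoopB js.toList js.toList.length none false 0 0 []).map (fun l => String.ofList l)

-- ===== PRECONDITION & SPEC =====
def Spec_iter_js_string_literals (js : String) (out : List String) : Prop := out = iter_js_string_literals_alt js
instance (js : String) (out : List String) : Decidable (Spec_iter_js_string_literals js out) := by unfold Spec_iter_js_string_literals; infer_instance

-- ===== CLAIM (what is proved, stated in full; the proofs are below) =====
def Claim_equal_iter_js_string_literals : Prop := ∀ (js : String), Dom_iter_js_string_literals js → Spec_iter_js_string_literals js (iter_js_string_literals js)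

-- ===== LEMMAS AND PROOFS =====

lemma pvSl_append (js : List Char) {a b c : Nat} (h1 : a ≤ b) (h2 : b ≤ c) :
    pvSl js a b ++ pvSl js b c = pvSl js a c := by
  unfold pvSl
  have hc : c - a = (b - a) + (c - b) := by omega
  rw [hc, List.take_add, List.drop_drop]
  have hb : a + (b - a) = b := by omega
  rw [hb]

lemma pvFlatten_step (js : List Char) {start i cs : Nat} (chunks : List (List Char))
    (h1 : cs ≤ start) (h2 : start ≤ i) (h3 : chunks.flatten = pvSl js cs start) :
    (if start < i then chunks ++ [pvSl js start i] else chunks).flatten = pvSl js cs i := by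
  by_cases hsi : start < i
  · simp only [if_pos hsi, List.flatten_append, List.flatten_cons, List.flatten_nil,
      List.append_nil, h3]
    exact pvSl_append js h1 h2
  · have hsi' : start = i := by omega
    simp [h3, hsi']

lemma pvInnerA_gt (js : List Char) (q : Char) :
    ∀ fuel i start chunks r j, pvInnerA js q fuel i start chunks = some (r, j) → i < j := by
  intro fuel
  induction fuel with
  | zero => intro i start chunks r j h; simp [pvInnerA] at h
  | succ fuel ih =>
    intro i start chunks r j hEq
    rw [pvInnerA] at hEq
    split at hEq
    · split_ifs at hEq <;>
        first
          | (have := ih (i+2) _ _ _ _ hEq; omega)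
          | (have := ih (i+1) _ _ _ _ hEq; omega)
          | (simp at hEq; omega)
    · simp at hEq

-- with sufficient fuel, the result does not depend on the fuel
lemma pvInnerA_irrel (js : List Char) (q : Char) :
    ∀ d f1 f2 i start chunks, js.length - i ≤ d → js.length - i ≤ f1 → js.length - i ≤ f2 →
      pvInnerA js q f1 i start chunks = pvInnerA js q f2 i start chunks := by
  intro d
  induction d with
  | zero =>
    intro f1 f2 i start chunks hd h1 h2
    have hi : ¬ i < js.length := by omega
    cases f1 <;> cases f2 <;> simp [pvInnerA, hi]
  | succ d ih =>
    intro f1 f2 i start chunks hd h1 h2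
    by_cases hi : i < js.length
    case neg => cases f1 <;> cases f2 <;> simp [pvInnerA, hi]
    case pos =>
    obtain ⟨f1', rfl⟩ : ∃ k, f1 = k + 1 := ⟨f1 - 1, by omega⟩
    obtain ⟨f2', rfl⟩ : ∃ k, f2 = k + 1 := ⟨f2 - 1, by omega⟩
    rw [pvInnerA, pvInnerA]
    simp only [dif_pos hi]
    by_cases hbs : js[i] = '\\'
    · by_cases hnext : i + 1 < js.length
      · simp only [if_pos hbs, if_pos hnext]
        exact ih f1' f2' (i+2) _ _ (by omega) (by omega) (by omega)
      · simp [hbs, hnext]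
    · by_cases hq : js[i] = q
      · simp only [if_neg hbs, if_pos hq]
      · simp only [if_neg hbs, if_neg hq]
        exact ih f1' f2' (i+1) _ _ (by omega) (by omega) (by omega)

lemma pvOuterA_irrel (js : List Char) :
    ∀ d f1 f2 i, js.length - i ≤ d → js.length - i ≤ f1 → js.length - i ≤ f2 →
      pvOuterA js f1 i = pvOuterA js f2 i := by
  intro d
  induction d with
  | zero =>
    intro f1 f2 i hd h1 h2
    have hi : ¬ i < js.length := by omega
    cases f1 <;> cases f2 <;> simp [pvOuterA, hi]
  | succ d ih =>
    intro f1 f2 i hd h1 h2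
    by_cases hi : i < js.length
    case neg => cases f1 <;> cases f2 <;> simp [pvOuterA, hi]
    case pos =>
    obtain ⟨f1', rfl⟩ : ∃ k, f1 = k + 1 := ⟨f1 - 1, by omega⟩
    obtain ⟨f2', rfl⟩ : ∃ k, f2 = k + 1 := ⟨f2 - 1, by omega⟩
    rw [pvOuterA, pvOuterA]
    simp only [dif_pos hi]
    by_cases hq : js[i] = '\'' ∨ js[i] = '"'
    · simp only [if_pos hq]
      rw [pvInnerA_irrel js (js[i]) (js.length - (i+1)) f1' f2' (i+1) (i+1) [] (le_refl _)
        (by omega) (by omega)]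
      rcases hm : pvInnerA js (js[i]) f2' (i+1) (i+1) [] with _ | ⟨_ | s, j⟩
      · rfl
      · have hj := pvInnerA_gt js (js[i]) f2' (i+1) (i+1) [] _ _ hm
        simp only []
        exact ih f1' f2' j (by omega) (by omega) (by omega)
      · have hj := pvInnerA_gt js (js[i]) f2' (i+1) (i+1) [] _ _ hm
        simp only []
        rw [ih f1' f2' j (by omega) (by omega) (by omega)]
    · simp only [if_neg hq]
      exact ih f1' f2' (i+1) (by omega) (by omega) (by omega)

-- A and B agree from any position, with any sufficient fuels: outside a literal B's loop appends
-- exactly A's outer-loop output; inside a literal (escaped = false) B's loop finishes it exactly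
-- as A's inner loop does, chunks.flatten being the slice already scanned.
lemma pvMain (js : List Char) :
    ∀ d fa fb i, js.length - i ≤ d → js.length - i ≤ fa → js.length - i ≤ fb →
      (∀ cs acc, pvLoopB js fb none false cs i acc = acc ++ pvOuterA js fa i) ∧
      (∀ q start cs chunks acc, cs ≤ start → start ≤ i →
         chunks.flatten = pvSl js cs start →
         pvLoopB js fb (some q) false cs i acc =
           match pvInnerA js q fa i start chunks with
           | some (some s, j) => (acc ++ [s]) ++ pvOuterA js fa j
           | some (none, j) => acc ++ pvOuterA js fa j
           | none => acc) := by
  intro d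
  induction d with
  | zero =>
    intro fa fb i hd hfa hfb
    have hi : ¬ i < js.length := by omega
    constructor
    · intro cs acc
      cases fa <;> cases fb <;> simp [pvLoopB, pvOuterA, hi]
    · intro q start cs chunks acc _ _ _
      cases fa <;> cases fb <;> simp [pvLoopB, pvInnerA, hi]
  | succ d ih =>
    intro fa fb i hd hfa hfb
    by_cases hi : i < js.length
    case neg =>
      constructor
      · intro cs acc
        cases fa <;> cases fb <;> simp [pvLoopB, pvOuterA, hi]
      · intro q start cs chunks acc _ _ _
        cases fa <;> cases fb <;> simp [pvLoopB, pvInnerA, hi]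
    case pos =>
    obtain ⟨fa', rfl⟩ : ∃ k, fa = k + 1 := ⟨fa - 1, by omega⟩
    obtain ⟨fb', rfl⟩ : ∃ k, fb = k + 1 := ⟨fb - 1, by omega⟩
    constructor
    · -- outside any literal
      intro cs acc
      rw [pvLoopB, pvOuterA]
      by_cases hq : js[i] = '\'' ∨ js[i] = '"'
      · simp only [dif_pos hi, if_pos hq]
        rw [(ih fa' fb' (i+1) (by omega) (by omega) (by omega)).2 (js[i]) (i+1) (i+1) [] acc
          (le_refl _) (le_refl _) (by simp [pvSl])]
        rcases hm : pvInnerA js (js[i]) fa' (i+1) (i+1) [] with _ | ⟨_ | s, j⟩ <;> simp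
      · simp only [dif_pos hi, if_neg hq]
        exact (ih fa' fb' (i+1) (by omega) (by omega) (by omega)).1 cs acc
    · -- inside a literal, escaped = False
      intro q start cs chunks acc h1 h2 h3
      rw [pvLoopB, pvInnerA]
      by_cases hbs : js[i] = '\\'
      · by_cases hnext : i + 1 < js.length
        · -- escape pair consumed: A jumps to i+2 with a new chunk; B takes two steps
          simp only [dif_pos hi, if_pos hbs, if_pos hnext, Bool.false_eq_true, if_false]
          obtain ⟨fb'', rfl⟩ : ∃ k, fb' = k + 1 := ⟨fb' - 1, by omega⟩
          rw [pvLoopB]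
          simp only [dif_pos hnext, if_true]
          have h3' : (((if start < i then chunks ++ [pvSl js start i] else chunks)
              ++ [pvSl js i (i+2)])).flatten = pvSl js cs (i+2) := by
            rw [List.flatten_append, pvFlatten_step js chunks h1 h2 h3]
            simp only [List.flatten_cons, List.flatten_nil, List.append_nil]
            exact pvSl_append js (le_trans h1 h2) (by omega)
          rw [(ih fa' fb'' (i+2) (by omega) (by omega) (by omega)).2 q (i+2) cs _ acc
            (by omega) (le_refl _) h3']
          rcases hm : pvInnerA js q fa' (i+2) (i+2) _ with _ | ⟨_ | s, j⟩
          · rfl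
          · have hj := pvInnerA_gt js q fa' (i+2) (i+2) _ _ _ hm
            simp only []
            rw [pvOuterA_irrel js (js.length - j) fa' (fa'+1) j (le_refl _) (by omega) (by omega)]
          · have hj := pvInnerA_gt js q fa' (i+2) (i+2) _ _ _ hm
            simp only []
            rw [pvOuterA_irrel js (js.length - j) fa' (fa'+1) j (le_refl _) (by omega) (by omega)]
        · -- dangling backslash: A breaks with no yield at i+1 = n; B's escaped step ends the loop
          simp only [dif_pos hi, if_pos hbs, if_neg hnext, Bool.false_eq_true, if_false]
          have hout : pvOuterA js (fa' + 1) (i+1) = [] := by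
            rw [pvOuterA]; simp [hnext]
          cases fb' <;> simp [pvLoopB, hnext, hout]
      · by_cases hq : js[i] = q
        · -- closing quote: A yields the joined chunks, B yields the one slice
          simp only [dif_pos hi, if_neg hbs, if_pos hq, Bool.false_eq_true, if_false]
          rw [(ih fa' fb' (i+1) (by omega) (by omega) (by omega)).1 cs (acc ++ [pvSl js cs i]),
            pvOuterA_irrel js (js.length - (i+1)) fa' (fa'+1) (i+1) (le_refl _) (by omega)
              (by omega)]
          simp [pvFlatten_step js chunks h1 h2 h3]
        · -- ordinary character: both just advance
          simp only [dif_pos hi, if_neg hbs, if_neg hq, Bool.false_eq_true, if_false]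
          rw [(ih fa' fb' (i+1) (by omega) (by omega) (by omega)).2 q start cs chunks acc
            h1 (by omega) h3]
          rcases hm : pvInnerA js q fa' (i+1) start chunks with _ | ⟨_ | s, j⟩
          · rfl
          · have hj := pvInnerA_gt js q fa' (i+1) start chunks _ _ hm
            simp only []
            rw [pvOuterA_irrel js (js.length - j) fa' (fa'+1) j (le_refl _) (by omega) (by omega)]
          · have hj := pvInnerA_gt js q fa' (i+1) start chunks _ _ hm
            simp only []
            rw [pvOuterA_irrel js (js.length - j) fa' (fa'+1) j (le_refl _) (by omega) (by omega)]

-- ===== VERDICT (by name: the statement is the Claim_ definition above) =====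
theorem iter_js_string_literals_spec : Claim_equal_iter_js_string_literals := by
  intro js _
  unfold Spec_iter_js_string_literals iter_js_string_literals iter_js_string_literals_alt
  rw [(pvMain js.toList js.toList.length js.toList.length js.toList.length 0 (by omega) (by omega)
    (by omega)).1 0 []]
  simp
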